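-- pv_equiv track=rewrite | github.com/MrBrantCode/unitest_baseline | mut_generate/mist_train_taco/taco_3437/solution.py | count_distinct_crosses
-- ===== SOURCE A (Python) =====
-- def count_distinct_crosses(n, m, s):
--     def ways(h, w, area):
--         if area == h * w:
--             return 2 * ((h + 1) // 2 * (w + 1) // 2) - 1
--         if area > h * w:
--             return 0
--         if area < h + w - 1:
--             return 0
--         area = h * w - area
--         if area % 4 != 0:
--             return 0
--         area //= 4
--         ans = 0
--         h //= 2
--         w //= 2
--         for a in range(1, h + 1):
--             if area % a == 0 and area // a <= w:
--                 ans += 1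
--         return ans * 2
--
--     ans = 0
--     for h in range(1, n + 1, 2):
--         for w in range(1, m + 1, 2):
--             ans += ways(h, w, s) * (n - h + 1) * (m - w + 1)
--     return ans
-- ===== SOURCE B (Python) =====
-- def count_distinct_crosses(n, m, s):
--     def ways(h, w, area):
--         if area == h * w:
--             return 2 * ((h + 1) // 2 * (w + 1) // 2) - 1
--         if area > h * w:
--             return 0
--         if area < h + w - 1:
--             return 0
--         rem = h * w - area
--         if rem % 4 != 0:
--             return 0
--         rem //= 4
--         h2 = h // 2
--         w2 = w // 2
--         # count divisor pairs (a, b) of rem with a <= h2, b <= w2 by meeting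
--         # each pair at its smaller member d (d <= sqrt(rem), and d <= h2 since
--         # min(a, b) <= a <= h2), instead of scanning every a up to h2
--         cnt = 0
--         d = 1
--         while d * d <= rem and d <= h2:
--             if rem % d == 0:
--                 e = rem // d
--                 if e <= w2:
--                     cnt += 1
--                 if e != d and e <= h2 and d <= w2:
--                     cnt += 1
--             d += 1
--         return 2 * cnt
--
--     total = 0
--     for h in range(1, n + 1, 2):
--         for w in range(1, m + 1, 2):
--             total += ways(h, w, s) * (n - h + 1) * (m - w + 1)
--     return total
-- ===== Notes on version B (the rewrite author's own statement) =====
-- stated objective: alternative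
-- what changed: The inner count of arm rectangles is computed by divisor-pair enumeration: each divisor pair (a,b) of rem with a<=h//2, b<=w//2 is met once at its smaller member, so the loop stops at min(isqrt(rem), h//2) instead of scanning every a from 1 to h//2.
import Mathlib
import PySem

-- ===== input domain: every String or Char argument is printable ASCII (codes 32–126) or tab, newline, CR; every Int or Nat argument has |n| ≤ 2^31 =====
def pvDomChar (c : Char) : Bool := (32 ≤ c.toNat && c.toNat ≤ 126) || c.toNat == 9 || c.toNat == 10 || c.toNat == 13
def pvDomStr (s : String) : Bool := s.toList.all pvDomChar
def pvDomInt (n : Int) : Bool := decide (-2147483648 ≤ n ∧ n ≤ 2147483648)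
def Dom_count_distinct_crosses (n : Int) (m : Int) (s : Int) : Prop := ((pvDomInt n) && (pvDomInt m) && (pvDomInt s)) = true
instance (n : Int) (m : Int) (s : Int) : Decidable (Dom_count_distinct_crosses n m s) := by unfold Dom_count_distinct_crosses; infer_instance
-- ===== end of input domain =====

-- B replaces A's scan of every a in 1..h//2 by divisor-pair enumeration up to min(isqrt(rem), h//2);
-- the proof shows the two counts agree via the pairing d ↦ rem/d on divisors (objective: alternative).

-- ===== PORT A =====
def pvWaysA (h : Int) (w : Int) (area : Int) : Int :=
  if area = h * w then
    2 * (PySem.Int.floordiv (PySem.Int.floordiv (h + 1) 2 * (w + 1)) 2) - 1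
  else if area > h * w then 0
  else if area < h + w - 1 then 0
  else
    let area2 := h * w - area
    if PySem.Int.mod area2 4 ≠ 0 then 0
    else
      let area3 := PySem.Int.floordiv area2 4
      let h2 := PySem.Int.floordiv h 2
      let w2 := PySem.Int.floordiv w 2
      let ans := (PySem.List.pyRange 1 (h2 + 1) 1).foldl
        (fun ans a =>
          if PySem.Int.mod area3 a = 0 ∧ PySem.Int.floordiv area3 a ≤ w2 then ans + 1 else ans) 0
      ans * 2

def count_distinct_crosses (n : Int) (m : Int) (s : Int) : Int :=
  (PySem.List.pyRange 1 (n + 1) 2).foldl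
    (fun ans h =>
      (PySem.List.pyRange 1 (m + 1) 2).foldl
        (fun ans w => ans + pvWaysA h w s * (n - h + 1) * (m - w + 1)) ans) 0

-- ===== PORT B =====
-- the 'while d * d <= rem and d <= h2' loop, with fuel (enough fuel is supplied at the call site)
def pvBLoop (rem : Int) (h2 : Int) (w2 : Int) : Nat → Int → Int → Int
  | 0, _, cnt => cnt
  | fuel + 1, d, cnt =>
    if d * d ≤ rem ∧ d ≤ h2 then
      let cnt' :=
        if PySem.Int.mod rem d = 0 then
          let e := PySem.Int.floordiv rem d
          let c1 := if e ≤ w2 then cnt + 1 else cnt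
          if e ≠ d ∧ e ≤ h2 ∧ d ≤ w2 then c1 + 1 else c1
        else cnt
      pvBLoop rem h2 w2 fuel (d + 1) cnt'
    else cnt

def pvWaysB (h : Int) (w : Int) (area : Int) : Int :=
  if area = h * w then
    2 * (PySem.Int.floordiv (PySem.Int.floordiv (h + 1) 2 * (w + 1)) 2) - 1
  else if area > h * w then 0
  else if area < h + w - 1 then 0
  else
    let rem0 := h * w - area
    if PySem.Int.mod rem0 4 ≠ 0 then 0
    else
      let rem := PySem.Int.floordiv rem0 4
      let h2 := PySem.Int.floordiv h 2
      let w2 := PySem.Int.floordiv w 2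
      2 * pvBLoop rem h2 w2 (rem.toNat + 1) 1 0

def count_distinct_crosses_alt (n : Int) (m : Int) (s : Int) : Int :=
  (PySem.List.pyRange 1 (n + 1) 2).foldl
    (fun total h =>
      (PySem.List.pyRange 1 (m + 1) 2).foldl
        (fun total w => total + pvWaysB h w s * (n - h + 1) * (m - w + 1)) total) 0

-- ===== PRECONDITION & SPEC =====
def Spec_count_distinct_crosses (n : Int) (m : Int) (s : Int) (out : Int) : Prop := out = count_distinct_crosses_alt n m s
instance (n : Int) (m : Int) (s : Int) (out : Int) : Decidable (Spec_count_distinct_crosses n m s out) := by unfold Spec_count_distinct_crosses; infer_instance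

-- ===== CLAIM (what is proved, stated in full; the proofs are below) =====
def Claim_equal_count_distinct_crosses : Prop := ∀ (n : Int) (m : Int) (s : Int), Dom_count_distinct_crosses n m s → Spec_count_distinct_crosses n m s (count_distinct_crosses n m s)

-- ===== LEMMAS AND PROOFS =====

-- the loop bound of B: smaller of h2 and the integer square root of rem
def pvCap (rem : Int) (h2 : Int) : Int := min h2 ((Nat.sqrt rem.toNat : Nat) : Int)

-- the two per-iteration contributions of B's loop body (d ≥ 1, so floordiv/mod are ediv/emod)
abbrev pvP1 (rem : Int) (w2 : Int) (d : Int) : Prop := d ∣ rem ∧ rem / d ≤ w2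
abbrev pvP2 (rem : Int) (h2 : Int) (w2 : Int) (d : Int) : Prop :=
  d ∣ rem ∧ rem / d ≠ d ∧ rem / d ≤ h2 ∧ d ≤ w2


-- d*d ≤ rem ↔ d ≤ √rem, for 1 ≤ d, 1 ≤ rem
lemma pvSqrt_iff (rem d : Int) (hr : 1 ≤ rem) (hd : 1 ≤ d) :
    d * d ≤ rem ↔ d ≤ ((Nat.sqrt rem.toNat : Nat) : Int) := by
  have hd' : (d.toNat : Int) = d := Int.toNat_of_nonneg (by omega)
  have hr' : (rem.toNat : Int) = rem := Int.toNat_of_nonneg (by omega)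
  have key : d.toNat * d.toNat ≤ rem.toNat ↔ d.toNat ≤ Nat.sqrt rem.toNat :=
    ⟨fun h => Nat.le_sqrt.mpr h, fun h => Nat.le_sqrt.mp h⟩
  constructor
  · intro h
    have : d.toNat * d.toNat ≤ rem.toNat := by
      have : ((d.toNat * d.toNat : Nat) : Int) ≤ ((rem.toNat : Nat) : Int) := by
        push_cast; rw [hd', hr']; exact h
      exact_mod_cast this
    omega
  · intro h
    have h2 : d.toNat ≤ Nat.sqrt rem.toNat := by omega
    have := key.mpr h2
    have : ((d.toNat * d.toNat : Nat) : Int) ≤ ((rem.toNat : Nat) : Int) := by exact_mod_cast this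
    push_cast at this; rw [hd', hr'] at this; exact this

-- B's loop computes the two counts over [1 .. cap]
lemma pvBLoop_spec (rem h2 w2 : Int) (hr : 1 ≤ rem) (fuel : Nat) (d cnt : Int)
    (hd : 1 ≤ d) (hfuel : (pvCap rem h2 + 1 - d).toNat + 1 ≤ fuel) :
    pvBLoop rem h2 w2 fuel d cnt =
      cnt + ((PySem.List.pyRange d (pvCap rem h2 + 1) 1).countP (fun x => decide (pvP1 rem w2 x)) : Int)
          + ((PySem.List.pyRange d (pvCap rem h2 + 1) 1).countP (fun x => decide (pvP2 rem h2 w2 x)) : Int) := by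
  induction fuel generalizing d cnt with
  | zero => omega
  | succ fuel ih =>
    have hmod : (PySem.Int.mod rem d = 0) ↔ d ∣ rem := PySem.Int.mod_eq_zero_iff_dvd rem d
    have hdiv : PySem.Int.floordiv rem d = rem / d := PySem.Int.floordiv_eq_ediv_of_pos (by omega)
    by_cases hcond : d * d ≤ rem ∧ d ≤ h2
    · have hdC : d ≤ pvCap rem h2 := by
        have := (pvSqrt_iff rem d hr hd).mp hcond.1
        unfold pvCap; exact le_min hcond.2 this
      have hcons : PySem.List.pyRange d (pvCap rem h2 + 1) 1
          = d :: PySem.List.pyRange (d + 1) (pvCap rem h2 + 1) 1 :=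
        PySem.List.pyRange_one_cons (by omega)
      have hstep : pvBLoop rem h2 w2 (fuel + 1) d cnt
          = pvBLoop rem h2 w2 fuel (d + 1)
              (cnt + (if pvP1 rem w2 d then 1 else 0) + (if pvP2 rem h2 w2 d then 1 else 0)) := by
        conv_lhs => rw [pvBLoop]
        rw [if_pos hcond]
        refine congrArg (pvBLoop rem h2 w2 fuel (d + 1)) ?_
        by_cases hm : PySem.Int.mod rem d = 0
        · have hdvd : d ∣ rem := hmod.mp hm
          rw [if_pos hm]
          simp only [hdiv]
          have e1 : (if pvP1 rem w2 d then (1:Int) else 0) = if rem / d ≤ w2 then 1 else 0 := by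
            simp [pvP1, hdvd]
          have e2 : (if pvP2 rem h2 w2 d then (1:Int) else 0)
              = if rem / d ≠ d ∧ rem / d ≤ h2 ∧ d ≤ w2 then 1 else 0 := by
            simp [pvP2, hdvd]
          rw [e1, e2]
          split_ifs <;> omega
        · have hdvd : ¬ d ∣ rem := fun h => hm (hmod.mpr h)
          rw [if_neg hm]
          simp [pvP1, pvP2, hdvd]
      have hf2 : (pvCap rem h2 + 1 - (d + 1)).toNat + 1 ≤ fuel := by omega
      rw [hstep, ih (d + 1) _ (by omega) hf2, hcons]
      simp only [List.countP_cons, decide_eq_true_eq]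
      push_cast
      split_ifs <;> omega
    · have hdC : pvCap rem h2 < d := by
        by_contra hle
        push Not at hle
        have h1 : d ≤ h2 := le_trans hle (min_le_left _ _)
        have h2' : d * d ≤ rem := (pvSqrt_iff rem d hr hd).mpr (le_trans hle (min_le_right _ _))
        exact hcond ⟨h2', h1⟩
      have hnil : PySem.List.pyRange d (pvCap rem h2 + 1) 1 = [] :=
        PySem.List.pyRange_one_eq_nil (by omega)
      conv_lhs => rw [pvBLoop]
      rw [if_neg hcond, hnil]
      simp

-- countP over pyRange a (b+1) 1 is a Finset card over Icc a b
lemma pvCountP_eq_card (a b : Int) (p : Int → Prop) [DecidablePred p] :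
    (PySem.List.pyRange a (b + 1) 1).countP (fun x => decide (p x)) =
      ((Finset.Icc a b).filter p).card := by
  have hnd : (PySem.List.pyRange a (b + 1) 1).Nodup := PySem.List.nodup_pyRange_one a (b + 1)
  have hfin : ((PySem.List.pyRange a (b + 1) 1).filter (fun x => decide (p x))).toFinset
      = (Finset.Icc a b).filter p := by
    ext x
    simp only [List.mem_toFinset, List.mem_filter, PySem.List.mem_pyRange_one, Finset.mem_filter,
      Finset.mem_Icc, decide_eq_true_eq]
    constructor
    · rintro ⟨⟨h1, h2⟩, h3⟩; exact ⟨⟨h1, by omega⟩, h3⟩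
    · rintro ⟨⟨h1, h2⟩, h3⟩; exact ⟨⟨h1, by omega⟩, h3⟩
  have hnd2 : ((PySem.List.pyRange a (b + 1) 1).filter (fun x => decide (p x))).Nodup :=
    hnd.filter _
  rw [List.countP_eq_length_filter, ← hfin, List.toFinset_card_of_nodup hnd2]

-- cofactor facts for a positive divisor of a positive integer
lemma pvCof (rem a : Int) (hr : 1 ≤ rem) (ha : 1 ≤ a) (hd : a ∣ rem) :
    1 ≤ rem / a ∧ rem = a * (rem / a) ∧ (rem / a) ∣ rem ∧ rem / (rem / a) = a := by
  obtain ⟨k, hk⟩ := hd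
  have ha0 : a ≠ 0 := by omega
  have hka : rem / a = k := by rw [hk, Int.mul_ediv_cancel_left _ ha0]
  have hk1 : 1 ≤ k := by nlinarith
  have hk0 : k ≠ 0 := by omega
  refine ⟨by omega, by rw [hka]; exact hk, ?_, ?_⟩
  · rw [hka]; exact ⟨a, by linarith [hk, mul_comm a k]⟩
  · rw [hka, hk, Int.mul_ediv_cancel _ hk0]

-- the pairing d ↦ rem/d: A's single count equals the sum of B's two counts
lemma pvCard_split (rem h2 w2 : Int) (hr : 1 ≤ rem) :
    (((Finset.Icc 1 h2).filter (fun a => pvP1 rem w2 a)).card : Int) =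
      (((Finset.Icc 1 (pvCap rem h2)).filter (fun d => pvP1 rem w2 d)).card : Int)
      + (((Finset.Icc 1 (pvCap rem h2)).filter (fun d => pvP2 rem h2 w2 d)).card : Int) := by
  set S := (Finset.Icc 1 h2).filter (fun a => pvP1 rem w2 a) with hS
  have hsplit : S.card = (S.filter (fun a => a * a ≤ rem)).card
      + (S.filter (fun a => ¬ a * a ≤ rem)).card :=
    (Finset.card_filter_add_card_filter_not (s := S) (p := fun a => a * a ≤ rem)).symm
  have hB1 : S.filter (fun a => a * a ≤ rem)
      = (Finset.Icc 1 (pvCap rem h2)).filter (fun d => pvP1 rem w2 d) := by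
    ext x
    simp only [hS, Finset.mem_filter, Finset.mem_Icc, pvCap, le_min_iff]
    constructor
    · rintro ⟨⟨⟨hx1, hx2⟩, hp⟩, hsq⟩
      exact ⟨⟨hx1, hx2, (pvSqrt_iff rem x hr hx1).mp hsq⟩, hp⟩
    · rintro ⟨⟨hx1, hx2, hx3⟩, hp⟩
      exact ⟨⟨⟨hx1, hx2⟩, hp⟩, (pvSqrt_iff rem x hr hx1).mpr hx3⟩
  have hB2 : (S.filter (fun a => ¬ a * a ≤ rem)).card
      = ((Finset.Icc 1 (pvCap rem h2)).filter (fun d => pvP2 rem h2 w2 d)).card := by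
    apply Finset.card_bij' (i := fun a _ => rem / a) (j := fun d _ => rem / d)
    · intro a ha
      simp only [hS, Finset.mem_filter, Finset.mem_Icc, pvP1, pvP2, pvCap, le_min_iff] at ha ⊢
      obtain ⟨⟨⟨ha1, ha2⟩, hdvd, hw⟩, hsq⟩ := ha
      obtain ⟨hq1, hqeq, hqdvd, hqq⟩ := pvCof rem a hr ha1 hdvd
      have hlt : rem / a < a := by nlinarith [hqeq]
      have hksq : (rem / a) * (rem / a) ≤ rem := by nlinarith [hqeq]
      refine ⟨⟨hq1, by omega, (pvSqrt_iff rem (rem / a) hr hq1).mp hksq⟩, hqdvd, ?_, ?_, hw⟩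
      · rw [hqq]; omega
      · rw [hqq]; exact ha2
    · intro d hd
      simp only [hS, Finset.mem_filter, Finset.mem_Icc, pvP1, pvP2, pvCap, le_min_iff] at hd ⊢
      obtain ⟨⟨hd1, hdh, hds⟩, hdvd, hne, heh, hw⟩ := hd
      obtain ⟨hq1, hqeq, hqdvd, hqq⟩ := pvCof rem d hr hd1 hdvd
      have hdd : d * d ≤ rem := (pvSqrt_iff rem d hr hd1).mpr hds
      have hlt : d < rem / d := by
        rcases lt_or_ge d (rem / d) with h | h
        · exact h
        · exfalso; apply hne; nlinarith [hqeq]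
      refine ⟨⟨⟨hq1, heh⟩, hqdvd, by rw [hqq]; exact hw⟩, ?_⟩
      nlinarith [hqeq]
    · intro a ha
      simp only [hS, Finset.mem_filter, Finset.mem_Icc, pvP1] at ha
      exact (pvCof rem a hr ha.1.1.1 ha.1.2.1).2.2.2
    · intro d hd
      simp only [Finset.mem_filter, Finset.mem_Icc, pvP2, pvCap, le_min_iff] at hd
      exact (pvCof rem d hr hd.1.1 hd.2.1).2.2.2
  rw [hsplit, hB1, hB2]
  push_cast
  ring

-- A's scan and B's capped divisor-pair loop agree on every input
lemma pvWaysA_eq_pvWaysB (h w area : Int) : pvWaysA h w area = pvWaysB h w area := by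
  unfold pvWaysA pvWaysB
  by_cases h1 : area = h * w
  · simp [h1]
  by_cases h2 : area > h * w
  · simp [h1, h2]
  by_cases h3 : area < h + w - 1
  · simp [h1, h2, h3]
  rw [if_neg h1, if_neg (by omega : ¬ area > h * w), if_neg h3,
      if_neg h1, if_neg (by omega : ¬ area > h * w), if_neg h3]
  by_cases h4 : PySem.Int.mod (h * w - area) 4 ≠ 0
  · simp only [if_pos h4]
  simp only [if_neg h4]
  push Not at h4
  have hdvd4 : (4:Int) ∣ (h * w - area) := (PySem.Int.mod_eq_zero_iff_dvd _ _).mp h4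
  have harea2 : 1 ≤ h * w - area := by omega
  have hdiv4 : PySem.Int.floordiv (h * w - area) 4 = (h * w - area) / 4 :=
    PySem.Int.floordiv_eq_ediv_of_pos (by omega)
  set rem := PySem.Int.floordiv (h * w - area) 4 with hrem
  have hr : 1 ≤ rem := by
    obtain ⟨k, hk⟩ := hdvd4
    have : rem = k := by rw [hdiv4, hk, Int.mul_ediv_cancel_left _ (by omega)]
    omega
  set h2' := PySem.Int.floordiv h 2
  set w2' := PySem.Int.floordiv w 2
  have hfuel : (pvCap rem h2' + 1 - 1).toNat + 1 ≤ rem.toNat + 1 := by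
    have hs : Nat.sqrt rem.toNat ≤ rem.toNat := Nat.sqrt_le_self _
    have : pvCap rem h2' ≤ ((Nat.sqrt rem.toNat : Nat) : Int) := min_le_right _ _
    omega
  rw [pvBLoop_spec rem h2' w2' hr (rem.toNat + 1) 1 0 (by omega) hfuel]
  have hcount : (PySem.List.pyRange 1 (h2' + 1) 1).foldl
      (fun ans a => if PySem.Int.mod rem a = 0 ∧ PySem.Int.floordiv rem a ≤ w2' then ans + 1 else ans) 0
      = ((PySem.List.pyRange 1 (h2' + 1) 1).countP (fun x => decide (pvP1 rem w2' x)) : Int) := by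
    rw [PySem.List.foldl_ite_add_one]
    have hc : (PySem.List.pyRange 1 (h2' + 1) 1).countP
        (fun x => decide (PySem.Int.mod rem x = 0 ∧ PySem.Int.floordiv rem x ≤ w2'))
        = (PySem.List.pyRange 1 (h2' + 1) 1).countP (fun x => decide (pvP1 rem w2' x)) := by
      refine List.countP_congr ?_
      intro x hx
      have hx1 : 1 ≤ x := ((PySem.List.mem_pyRange_one).mp hx).1
      simp only [decide_eq_true_eq, pvP1, PySem.Int.mod_eq_zero_iff_dvd,
        PySem.Int.floordiv_eq_ediv_of_pos (show (0:Int) < x by omega)]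
    rw [hc]
    omega
  rw [hcount, pvCountP_eq_card 1 h2' (pvP1 rem w2'), pvCountP_eq_card 1 (pvCap rem h2') (pvP1 rem w2'),
      pvCountP_eq_card 1 (pvCap rem h2') (pvP2 rem h2' w2'), pvCard_split rem h2' w2' hr]
  ring

-- ===== VERDICT (by name: the statement is the Claim_ definition above) =====
theorem count_distinct_crosses_spec : Claim_equal_count_distinct_crosses := by
  intro n m s _
  unfold Spec_count_distinct_crosses count_distinct_crosses count_distinct_crosses_alt
  simp only [pvWaysA_eq_pvWaysB]
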